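-- pv_equiv track=rewrite | github.com/saltar2/Autosubs | spacy_nlp.py | calcular_suma_acumulativa
-- ===== SOURCE A (Python) =====
-- def obtener_longitudes_palabras(texto):
--     palabras = texto.split()
--     len_palabras = [len(palabra) for palabra in palabras]
--     #return json.dumps(palabras_longitudes, ensure_ascii=False)
--     return palabras,len_palabras
--
-- def agrupar_palabras_por_tamaño(palabras,len_palabras, max_chars, margin):
--     grupos = []
--     grupo_actual = []
--     longitud_actual = 0
--
--     for i,palabra in enumerate(palabras):
--         longitud = len_palabras[i]
--         if longitud_actual + longitud <= max_chars + margin: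
--             grupo_actual.append(palabra)
--             longitud_actual += longitud
--         else:
--             grupos.append(grupo_actual)
--             grupo_actual = [palabra]
--             longitud_actual = longitud
--
--     if grupo_actual:
--         grupos.append(grupo_actual)
--
--     return grupos
--
-- def calcular_suma_acumulativa(texto, max_chars, margin):
--     palabras, len_palabras = obtener_longitudes_palabras(texto)
--     grupos = agrupar_palabras_por_tamaño(palabras, len_palabras, max_chars, margin)
--     suma_palabras_por_grupo = [len(grupo) for grupo in grupos]
--
--     suma_acumulativa = []
--     suma_temporal = 0
--
--     for num_palabras in suma_palabras_por_grupo: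
--         suma_temporal += num_palabras
--         suma_acumulativa.append(suma_temporal)
--
--     return suma_acumulativa
-- ===== SOURCE B (Python) =====
-- def calcular_suma_acumulativa(texto, max_chars, margin):
--     # One pass over the words with three scalar counters; no group lists built.
--     limite = max_chars + margin
--     resultado = []
--     total = 0          # words in already-closed groups
--     cuenta = 0         # words in the current group (starts at 0: first oversized word closes an empty group)
--     longitud = 0       # character length of the current group
--     for palabra in texto.split():
--         l = len(palabra)
--         if longitud + l <= limite:
--             cuenta += 1
--             longitud += l
--         else:
--             total += cuenta
--             resultado.append(total)
--             cuenta = 1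
--             longitud = l
--     if cuenta:
--         resultado.append(total + cuenta)
--     return resultado
-- ===== Notes on version B (the rewrite author's own statement) =====
-- stated objective: simpler
-- what changed: Replaces A's three passes (building the list of word groups, mapping it to group sizes, then a cumulative-sum loop) with a single pass over the words that keeps three scalar counters (closed-group total, current-group count, current-group length) and never materialises the groups.
import Mathlib
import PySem

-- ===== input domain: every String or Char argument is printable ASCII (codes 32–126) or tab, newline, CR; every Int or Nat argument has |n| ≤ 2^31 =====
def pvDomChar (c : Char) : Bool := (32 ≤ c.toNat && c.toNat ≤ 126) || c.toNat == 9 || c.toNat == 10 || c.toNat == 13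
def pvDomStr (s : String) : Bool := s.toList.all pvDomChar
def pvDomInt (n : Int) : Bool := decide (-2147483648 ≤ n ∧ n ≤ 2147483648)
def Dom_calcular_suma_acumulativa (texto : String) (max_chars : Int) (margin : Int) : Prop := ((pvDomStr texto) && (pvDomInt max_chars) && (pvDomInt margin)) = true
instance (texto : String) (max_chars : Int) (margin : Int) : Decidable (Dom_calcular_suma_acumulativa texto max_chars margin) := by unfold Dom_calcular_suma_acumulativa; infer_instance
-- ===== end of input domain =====

-- B replaces A's three passes (group lists of words, list of group sizes, cumulative-sum loop)
-- by a single pass over the words maintaining three scalar counters (objective: simpler, same asymptotic cost).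

-- ===== PORT A =====
def obtener_longitudes_palabras (texto : String) : List String × List Int :=
  let palabras := PySem.Str.split₀ texto
  let len_palabras := palabras.map (fun palabra => PySem.Str.len palabra)
  (palabras, len_palabras)

-- loop body of agrupar_palabras_por_tamaño, as a named step function
def pasoAgrupar (len_palabras : List Int) (max_chars margin : Int)
    (st : List (List String) × List String × Int) (ip : Int × String) :
    List (List String) × List String × Int :=
  let palabra := ip.2
  let longitud := PySem.List.pyGetD len_palabras ip.1 0
  if st.2.2 + longitud ≤ max_chars + margin then
    (st.1, st.2.1 ++ [palabra], st.2.2 + longitud)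
  else
    (st.1 ++ [st.2.1], [palabra], longitud)

def agrupar_palabras_por_tamaño (palabras : List String) (len_palabras : List Int)
    (max_chars margin : Int) : List (List String) :=
  let st := (PySem.List.enumerate palabras 0).foldl
    (pasoAgrupar len_palabras max_chars margin) ([], [], 0)
  if st.2.1 = [] then st.1 else st.1 ++ [st.2.1]

-- loop body of the cumulative-sum loop
def pasoSuma (p : List Int × Int) (num_palabras : Int) : List Int × Int :=
  (p.1 ++ [p.2 + num_palabras], p.2 + num_palabras)

def calcular_suma_acumulativa (texto : String) (max_chars : Int) (margin : Int) : List Int :=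
  let pl := obtener_longitudes_palabras texto
  let grupos := agrupar_palabras_por_tamaño pl.1 pl.2 max_chars margin
  let suma_palabras_por_grupo := grupos.map (fun grupo => (grupo.length : Int))
  (suma_palabras_por_grupo.foldl pasoSuma ([], 0)).1

-- ===== PORT B =====
-- state: (resultado, total, cuenta, longitud)
def pasoB (limite : Int) (st : List Int × Int × Int × Int) (palabra : String) :
    List Int × Int × Int × Int :=
  let l := PySem.Str.len palabra
  if st.2.2.2 + l ≤ limite then
    (st.1, st.2.1, st.2.2.1 + 1, st.2.2.2 + l)
  else
    (st.1 ++ [st.2.1 + st.2.2.1], st.2.1 + st.2.2.1, 1, l)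

def calcular_suma_acumulativa_alt (texto : String) (max_chars : Int) (margin : Int) : List Int :=
  let limite := max_chars + margin
  let st := (PySem.Str.split₀ texto).foldl (pasoB limite) ([], 0, 0, 0)
  if st.2.2.1 = 0 then st.1 else st.1 ++ [st.2.1 + st.2.2.1]

-- ===== PRECONDITION & SPEC =====
def Spec_calcular_suma_acumulativa (texto : String) (max_chars : Int) (margin : Int) (out : List Int) : Prop := out = calcular_suma_acumulativa_alt texto max_chars margin
instance (texto : String) (max_chars : Int) (margin : Int) (out : List Int) : Decidable (Spec_calcular_suma_acumulativa texto max_chars margin out) := by unfold Spec_calcular_suma_acumulativa; infer_instance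

-- ===== CLAIM (what is proved, stated in full; the proofs are below) =====
def Claim_equal_calcular_suma_acumulativa : Prop := ∀ (texto : String) (max_chars : Int) (margin : Int), Dom_calcular_suma_acumulativa texto max_chars margin → Spec_calcular_suma_acumulativa texto max_chars margin (calcular_suma_acumulativa texto max_chars margin)

-- ===== LEMMAS AND PROOFS =====

-- cumulative sums of a list of group sizes, starting from a running total t
def cum : List Int → Int → List Int
  | [], _ => []
  | n :: ns, t => (t + n) :: cum ns (t + n)

def sizes (gs : List (List String)) : List Int := gs.map (fun g => (g.length : Int))

theorem foldl_pasoSuma (ns : List Int) : ∀ (acc : List Int) (t : Int),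
    ns.foldl pasoSuma (acc, t) = (acc ++ cum ns t, t + ns.sum) := by
  induction ns with
  | nil => intro acc t; simp [cum]
  | cons n ns ih =>
    intro acc t
    simp only [List.foldl_cons, pasoSuma, cum, ih, List.sum_cons, Prod.mk.injEq]
    exact ⟨by simp, by ring⟩

theorem cum_append (ns : List Int) : ∀ (t n : Int),
    cum (ns ++ [n]) t = cum ns t ++ [t + ns.sum + n] := by
  induction ns with
  | nil => intro t n; simp [cum]
  | cons m ns ih =>
    intro t n
    simp only [List.cons_append, cum, ih, List.sum_cons]
    have h : t + m + ns.sum + n = t + (m + ns.sum) + n := by ring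
    rw [h]

-- the A-side finishing step applied to a grouping state, rendered as B produces it
theorem loop_invariant (ws : List String) : ∀ (pre : List String) (lens : List Int)
    (max_chars margin : Int) (grupos : List (List String)) (ga : List String) (la : Int),
    lens = (pre ++ ws).map PySem.Str.len →
    (let stA := (PySem.List.enumerate ws (pre.length : Int)).foldl
        (pasoAgrupar lens max_chars margin) (grupos, ga, la)
     cum (sizes (if stA.2.1 = [] then stA.1 else stA.1 ++ [stA.2.1])) 0)
    = (let stB := ws.foldl (pasoB (max_chars + margin))
        (cum (sizes grupos) 0, (sizes grupos).sum, (ga.length : Int), la)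
       if stB.2.2.1 = 0 then stB.1 else stB.1 ++ [stB.2.1 + stB.2.2.1]) := by
  induction ws with
  | nil =>
    intro pre lens mc mg grupos ga la hlens
    simp only [PySem.List.enumerate_nil, List.foldl_nil]
    by_cases hga : ga = []
    · simp [hga]
    · have : (ga.length : Int) ≠ 0 := by
        simp [List.length_eq_zero_iff, hga]
      simp only [if_neg hga, if_neg this, sizes, List.map_append, List.map_cons, List.map_nil]
      rw [show (List.map (fun g => (g.length : Int)) grupos) ++ [(ga.length : Int)]
            = sizes grupos ++ [(ga.length : Int)] from rfl, cum_append]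
      simp [sizes]
  | cons w tl ih =>
    intro pre lens mc mg grupos ga la hlens
    rw [PySem.List.enumerate_cons]
    simp only [List.foldl_cons]
    have hlen : PySem.List.pyGetD lens (pre.length : Int) 0 = PySem.Str.len w := by
      subst hlens
      rw [PySem.List.pyGetD_natCast]
      have : pre.length < ((pre ++ w :: tl).map PySem.Str.len).length := by simp
      rw [List.getD_eq_getElem _ _ this, List.getElem_map]
      simp
    have hstepA : pasoAgrupar lens mc mg (grupos, ga, la) ((pre.length : Int), w)
        = (if la + PySem.Str.len w ≤ mc + mg then (grupos, ga ++ [w], la + PySem.Str.len w)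
           else (grupos ++ [ga], [w], PySem.Str.len w)) := by
      simp [pasoAgrupar, hlen]
    have hstepB : pasoB (mc + mg) (cum (sizes grupos) 0, (sizes grupos).sum, (ga.length : Int), la) w
        = (if la + PySem.Str.len w ≤ mc + mg then
             (cum (sizes grupos) 0, (sizes grupos).sum, (ga.length : Int) + 1, la + PySem.Str.len w)
           else
             (cum (sizes grupos) 0 ++ [(sizes grupos).sum + ga.length],
              (sizes grupos).sum + ga.length, 1, PySem.Str.len w)) := by
      simp [pasoB]
    rw [hstepA, hstepB]
    by_cases hc : la + PySem.Str.len w ≤ mc + mg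
    · rw [if_pos hc, if_pos hc]
      have h1 : ((pre.length : Int)) + 1 = ((pre ++ [w]).length : Int) := by
        simp
      have h2 : (ga.length : Int) + 1 = (((ga ++ [w]).length : Int)) := by
        simp
      rw [h1, h2]
      exact ih (pre ++ [w]) lens mc mg grupos (ga ++ [w]) (la + PySem.Str.len w)
        (by simpa using hlens)
    · rw [if_neg hc, if_neg hc]
      have h1 : ((pre.length : Int)) + 1 = ((pre ++ [w]).length : Int) := by simp
      have hres : cum (sizes (grupos ++ [ga])) 0 = cum (sizes grupos) 0 ++ [(sizes grupos).sum + ga.length] := by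
        have : sizes (grupos ++ [ga]) = sizes grupos ++ [(ga.length : Int)] := by
          simp [sizes]
        rw [this, cum_append]
        simp
      have htot : (sizes (grupos ++ [ga])).sum = (sizes grupos).sum + ga.length := by
        simp [sizes]
      have hcnt : (1 : Int) = (([w] : List String).length : Int) := by simp
      rw [h1, ← hres, ← htot, hcnt]
      exact ih (pre ++ [w]) lens mc mg (grupos ++ [ga]) [w] (PySem.Str.len w)
        (by simpa using hlens)

-- ===== VERDICT (by name: the statement is the Claim_ definition above) =====
theorem calcular_suma_acumulativa_spec : Claim_equal_calcular_suma_acumulativa := by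
  intro texto max_chars margin _
  unfold Spec_calcular_suma_acumulativa
  unfold calcular_suma_acumulativa calcular_suma_acumulativa_alt
    obtener_longitudes_palabras agrupar_palabras_por_tamaño
  simp only []
  rw [foldl_pasoSuma]
  simp only [List.nil_append]
  have := loop_invariant (PySem.Str.split₀ texto) [] ((PySem.Str.split₀ texto).map PySem.Str.len)
    max_chars margin [] [] 0 (by simp)
  simpa [sizes, cum] using this
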